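-- pv_equiv track=rewrite | github.com/JUNSUNGKIM99/codetree-TILs | 240523/Cycle/cycle.py | find_cycle_size
-- ===== SOURCE A (Python) =====
-- def find_cycle_size(N, P):
--     visited = {}  # 이미 방문한 숫자를 저장하기 위한 딕셔너리
--     current = N   # 시작 숫자
--
--     count = 0     # 반복 횟수 카운트
--     while current not in visited:
--         visited[current] = count  # 현재 숫자와 반복 횟수 저장
--         count += 1
--         # 현재 숫자를 key로 하고 count를 value로 가지고있으면, 다음에 만날때 빼면됨...
--         # 다음 숫자 계산
--         next_num = (current * N) % P
--         current = next_num
--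
--     return count - visited[current]  # 사이클의 크기 반환
-- ===== SOURCE B (Python) =====
-- def find_cycle_size(N, P):
--     # Floyd cycle detection on f(x) = (x*N) % P: no visited table, two pointers.
--     slow = (N * N) % P
--     fast = (slow * N) % P
--     while slow != fast:
--         slow = (slow * N) % P
--         fast = (((fast * N) % P) * N) % P
--     size = 1
--     cur = (slow * N) % P
--     while cur != slow:
--         cur = (cur * N) % P
--         size += 1
--     return size
-- ===== Notes on version B (the rewrite author's own statement) =====
-- stated objective: alternative
-- what changed: Replaces A's visited-dictionary (hash table mapping each value to its step index) with Floyd's tortoise-and-hare cycle detection: two integer pointers meet inside the cycle, then one walks once around the cycle to count its length; only O(1) extra state instead of a table of all visited values.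
import Mathlib
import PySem

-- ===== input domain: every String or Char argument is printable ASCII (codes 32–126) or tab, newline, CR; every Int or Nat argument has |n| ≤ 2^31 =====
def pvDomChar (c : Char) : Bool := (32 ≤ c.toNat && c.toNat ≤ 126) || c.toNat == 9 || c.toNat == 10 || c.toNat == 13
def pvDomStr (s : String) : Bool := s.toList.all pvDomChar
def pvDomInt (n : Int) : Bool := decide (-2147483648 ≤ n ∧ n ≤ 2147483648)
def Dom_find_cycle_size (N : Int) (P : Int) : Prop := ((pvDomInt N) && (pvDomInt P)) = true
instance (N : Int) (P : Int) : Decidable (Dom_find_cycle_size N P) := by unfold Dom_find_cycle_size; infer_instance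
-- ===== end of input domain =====

-- B replaces A's visited-dictionary loop by Floyd's tortoise-and-hare cycle detection
-- (two integer pointers, no table); equal return value is proved for every P ≠ 0.

-- ===== PORT A =====
-- A's while loop, one recursive step per iteration; the fuel P.natAbs + 2 is proved
-- sufficient below (the loop repeats a value within |P| + 1 steps when P ≠ 0).
def pvA_go (N : Int) (P : Int) : Nat → PySem.Dict Int Int → Int → Int → Int
  | 0, _, _, count => count
  | fuel + 1, visited, current, count =>
    if visited.contains current then
      count - visited.getD current 0
    else
      pvA_go N P fuel (visited.insert current count) (PySem.Int.mod (current * N) P) (count + 1)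

def find_cycle_size (N : Int) (P : Int) : Int :=
  pvA_go N P (P.natAbs + 2) PySem.Dict.empty N 0

-- ===== PORT B =====
-- phase 1 of Source B: while slow != fast: slow, fast advance by one resp. two steps
def pvB_meet (N : Int) (P : Int) : Nat → Int → Int → Int
  | 0, slow, _ => slow
  | fuel + 1, slow, fast =>
    if slow = fast then slow
    else pvB_meet N P fuel (PySem.Int.mod (slow * N) P)
           (PySem.Int.mod (PySem.Int.mod (fast * N) P * N) P)

-- phase 2 of Source B: while cur != slow: cur advances, size counts
def pvB_count (N : Int) (P : Int) : Nat → Int → Int → Int → Int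
  | 0, _, _, size => size
  | fuel + 1, cur, slow, size =>
    if cur = slow then size
    else pvB_count N P fuel (PySem.Int.mod (cur * N) P) slow (size + 1)

def find_cycle_size_alt (N : Int) (P : Int) : Int :=
  let slow := PySem.Int.mod (N * N) P
  let fast := PySem.Int.mod (slow * N) P
  let t := pvB_meet N P (P.natAbs + 2) slow fast
  pvB_count N P (P.natAbs + 2) (PySem.Int.mod (t * N) P) t 1

-- ===== PRECONDITION & SPEC =====
-- P = 0 is excluded: there Python A (and B) raises ZeroDivisionError at the first '%'.
def Pre_find_cycle_size (N : Int) (P : Int) : Prop := P ≠ 0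
instance (N : Int) (P : Int) : Decidable (Pre_find_cycle_size N P) := by unfold Pre_find_cycle_size; infer_instance
def pvWitness_find_cycle_size : Int × Int := (3, 10)

def Spec_find_cycle_size (N : Int) (P : Int) (out : Int) : Prop := out = find_cycle_size_alt N P
instance (N : Int) (P : Int) (out : Int) : Decidable (Spec_find_cycle_size N P out) := by unfold Spec_find_cycle_size; infer_instance

-- ===== CLAIM (what is proved, stated in full; the proofs are below) =====
def Claim_equal_find_cycle_size : Prop := ∀ (N : Int) (P : Int), Dom_find_cycle_size N P → Pre_find_cycle_size N P → Spec_find_cycle_size N P (find_cycle_size N P)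

-- ===== LEMMAS AND PROOFS =====

-- the orbit N, (N*N)%P, ((N*N)%P*N)%P, … that both programs walk
def pvSeq (N : Int) (P : Int) : Nat → Int
  | 0 => N
  | k + 1 => PySem.Int.mod (pvSeq N P k * N) P

-- "the value at index n already occurred"
def pvRep (N : Int) (P : Int) (n : Nat) : Prop := ∃ m, m < n ∧ pvSeq N P m = pvSeq N P n

-- C: index of the first repeated value; J: the earlier index it equals; lam = C - J the cycle length
noncomputable def pvC (N : Int) (P : Int) : Nat := sInf {n | pvRep N P n}
noncomputable def pvJ (N : Int) (P : Int) : Nat := sInf {m | m < pvC N P ∧ pvSeq N P m = pvSeq N P (pvC N P)}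
noncomputable def pvLam (N : Int) (P : Int) : Nat := pvC N P - pvJ N P
-- K: first index k ≥ 1 with seq k = seq 2k (Floyd's meeting index)
noncomputable def pvK (N : Int) (P : Int) : Nat := sInf {k | 1 ≤ k ∧ pvSeq N P k = pvSeq N P (2 * k)}

lemma pvCollision (N P : Int) (hP : P ≠ 0) : ∃ n, n ≤ P.natAbs + 1 ∧ pvRep N P n := by
  have hmem : ∀ k : Nat, (pvSeq N P (k + 1)).natAbs < P.natAbs := by
    intro k
    show (PySem.Int.mod (pvSeq N P k * N) P).natAbs < P.natAbs
    rcases lt_or_gt_of_ne hP with hneg | hpos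
    · have h := PySem.Int.mod_neg_bounds (pvSeq N P k * N) hneg
      omega
    · have h1 := PySem.Int.mod_nonneg (pvSeq N P k * N) hpos
      have h2 := PySem.Int.mod_lt (pvSeq N P k * N) hpos
      omega
  have hsign : ∀ j k : Nat, (pvSeq N P (j + 1)).natAbs = (pvSeq N P (k + 1)).natAbs →
      pvSeq N P (j + 1) = pvSeq N P (k + 1) := by
    intro j k h
    rcases lt_or_gt_of_ne hP with hneg | hpos
    · have hj := (PySem.Int.mod_neg_bounds (pvSeq N P j * N) hneg).2
      have hk := (PySem.Int.mod_neg_bounds (pvSeq N P k * N) hneg).2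
      simp only [pvSeq] at h ⊢
      omega
    · have hj := PySem.Int.mod_nonneg (pvSeq N P j * N) hpos
      have hk := PySem.Int.mod_nonneg (pvSeq N P k * N) hpos
      simp only [pvSeq] at h ⊢
      omega
  obtain ⟨a, b, hne, heq⟩ := Fintype.exists_ne_map_eq_of_card_lt
      (f := fun k : Fin (P.natAbs + 1) => (⟨(pvSeq N P (k.1 + 1)).natAbs, hmem k.1⟩ : Fin P.natAbs))
      (by simp)
  have hvals : pvSeq N P (a.1 + 1) = pvSeq N P (b.1 + 1) := by
    apply hsign
    simpa using congrArg Fin.val heq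
  have hvne : a.1 ≠ b.1 := fun h => hne (Fin.val_injective h)
  rcases Nat.lt_or_ge a.1 b.1 with hab | hab
  · exact ⟨b.1 + 1, by omega, ⟨a.1 + 1, by omega, hvals⟩⟩
  · exact ⟨a.1 + 1, by omega, ⟨b.1 + 1, by omega, hvals.symm⟩⟩

lemma pvC_rep (N P : Int) (hP : P ≠ 0) : pvRep N P (pvC N P) := by
  obtain ⟨n, _, hn⟩ := pvCollision N P hP
  have hne : {n | pvRep N P n}.Nonempty := ⟨n, hn⟩
  exact Nat.sInf_mem hne

lemma pvC_bound (N P : Int) (hP : P ≠ 0) : pvC N P ≤ P.natAbs + 1 := by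
  obtain ⟨n, hle, hn⟩ := pvCollision N P hP
  exact le_trans (Nat.sInf_le hn) hle

lemma pvInj (N P : Int) {i j : Nat} (hi : i < pvC N P) (hj : j < pvC N P) (hne : i ≠ j) :
    pvSeq N P i ≠ pvSeq N P j := by
  intro heq
  rcases Nat.lt_or_ge i j with h | h
  · exact Nat.notMem_of_lt_sInf hj ⟨i, h, heq⟩
  · have h' : j < i := by omega
    exact Nat.notMem_of_lt_sInf hi ⟨j, h', heq.symm⟩

lemma pvJ_spec (N P : Int) (hP : P ≠ 0) :
    pvJ N P < pvC N P ∧ pvSeq N P (pvJ N P) = pvSeq N P (pvC N P) := by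
  obtain ⟨m, hm, hmeq⟩ := pvC_rep N P hP
  have hne : {m | m < pvC N P ∧ pvSeq N P m = pvSeq N P (pvC N P)}.Nonempty := ⟨m, hm, hmeq⟩
  exact Nat.sInf_mem hne

lemma pvLam_pos (N P : Int) (hP : P ≠ 0) : 0 < pvLam N P := by
  have := (pvJ_spec N P hP).1
  unfold pvLam
  omega

lemma pvPeriod1 (N P : Int) (hP : P ≠ 0) :
    ∀ k, pvJ N P ≤ k → pvSeq N P (k + pvLam N P) = pvSeq N P k := by
  intro k hk
  induction k, hk using Nat.le_induction with
  | base =>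
    have h1 : pvJ N P + pvLam N P = pvC N P := by
      have := (pvJ_spec N P hP).1; unfold pvLam; omega
    rw [h1]
    exact (pvJ_spec N P hP).2.symm
  | succ k hk ih =>
    have h2 : k + 1 + pvLam N P = (k + pvLam N P) + 1 := by omega
    rw [h2]
    show PySem.Int.mod (pvSeq N P (k + pvLam N P) * N) P = PySem.Int.mod (pvSeq N P k * N) P
    rw [ih]

lemma pvPeriodMul (N P : Int) (hP : P ≠ 0) :
    ∀ (d k : Nat), pvJ N P ≤ k → pvSeq N P (k + pvLam N P * d) = pvSeq N P k := by
  intro d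
  induction d with
  | zero => intro k _; simp
  | succ d ih =>
    intro k hk
    have h : k + pvLam N P * (d + 1) = (k + pvLam N P * d) + pvLam N P := by ring
    rw [h, pvPeriod1 N P hP _ (by omega), ih k hk]

lemma pvReduce (N P : Int) (hP : P ≠ 0) :
    ∀ k, pvJ N P ≤ k → pvSeq N P k = pvSeq N P (pvJ N P + (k - pvJ N P) % pvLam N P) := by
  intro k hk
  have hl := pvLam_pos N P hP
  have hdm := Nat.div_add_mod (k - pvJ N P) (pvLam N P)
  have h : k = (pvJ N P + (k - pvJ N P) % pvLam N P) + pvLam N P * ((k - pvJ N P) / pvLam N P) := by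
    omega
  conv_lhs => rw [h]
  exact pvPeriodMul N P hP _ _ (by omega)

lemma pvMinPeriod (N P : Int) (hP : P ≠ 0) :
    ∀ m c, pvJ N P ≤ m → 0 < c → c < pvLam N P → pvSeq N P (m + c) ≠ pvSeq N P m := by
  intro m c hm hc hcl heq
  have hl := pvLam_pos N P hP
  have hJC : pvJ N P + pvLam N P = pvC N P := by
    have := (pvJ_spec N P hP).1; unfold pvLam; omega
  have h1 := pvReduce N P hP m hm
  have h2 := pvReduce N P hP (m + c) (by omega)
  have hmod1 : (m - pvJ N P) % pvLam N P < pvLam N P := Nat.mod_lt _ hl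
  have hmod2 : (m + c - pvJ N P) % pvLam N P < pvLam N P := Nat.mod_lt _ hl
  have hne : pvJ N P + (m - pvJ N P) % pvLam N P ≠ pvJ N P + (m + c - pvJ N P) % pvLam N P := by
    intro h
    have e1 : m + c - pvJ N P = (m - pvJ N P) + c := by omega
    rw [e1] at h
    have hmeq : (m - pvJ N P) % pvLam N P = ((m - pvJ N P) + c) % pvLam N P := by omega
    have hdvd : pvLam N P ∣ ((m - pvJ N P) + c) - (m - pvJ N P) :=
      (Nat.modEq_iff_dvd' (by omega)).1 hmeq
    have : pvLam N P ∣ c := by simpa using hdvd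
    have := Nat.le_of_dvd hc this
    omega
  refine pvInj N P (i := pvJ N P + (m - pvJ N P) % pvLam N P)
    (j := pvJ N P + (m + c - pvJ N P) % pvLam N P) (by omega) (by omega) hne ?_
  rw [← h1, ← h2]
  exact heq.symm

-- ===== A-side: the visited dictionary after k iterations =====
def pvDict (N : Int) (P : Int) : Nat → PySem.Dict Int Int
  | 0 => PySem.Dict.empty
  | k + 1 => (pvDict N P k).insert (pvSeq N P k) (k : Int)

lemma pvDict_contains (N P : Int) :
    ∀ k x, (pvDict N P k).contains x = true ↔ ∃ i, i < k ∧ pvSeq N P i = x := by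
  intro k
  induction k with
  | zero => intro x; simp [pvDict, PySem.Dict.contains_empty]
  | succ k ih =>
    intro x
    rw [pvDict, PySem.Dict.contains_insert]
    constructor
    · intro h
      rcases Bool.or_eq_true_iff.1 h with h | h
      · exact ⟨k, by omega, (eq_of_beq h).symm⟩
      · obtain ⟨i, hi, hieq⟩ := (ih x).1 h
        exact ⟨i, by omega, hieq⟩
    · rintro ⟨i, hi, hieq⟩
      rcases Nat.lt_or_ge i k with h | h
      · exact Bool.or_eq_true_iff.2 (Or.inr ((ih x).2 ⟨i, h, hieq⟩))
      · have : i = k := by omega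
        subst this
        exact Bool.or_eq_true_iff.2 (Or.inl (by simp [hieq]))

lemma pvDict_getD (N P : Int) :
    ∀ k, k ≤ pvC N P → ∀ j, j < k → (pvDict N P k).getD (pvSeq N P j) 0 = (j : Int) := by
  intro k
  induction k with
  | zero => intro _ j hj; omega
  | succ k ih =>
    intro hk j hj
    rw [pvDict, PySem.Dict.getD_insert]
    rcases Nat.lt_or_ge j k with h | h
    · rw [if_neg (pvInj N P (by omega) (by omega) (by omega))]
      exact ih (by omega) j h
    · have : j = k := by omega
      subst this
      rw [if_pos rfl]

lemma pvA_go_spec (N P : Int) (hP : P ≠ 0) :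
    ∀ fuel k, k ≤ pvC N P → pvC N P < k + fuel →
      pvA_go N P fuel (pvDict N P k) (pvSeq N P k) (k : Int) = (pvC N P : Int) - (pvJ N P : Int) := by
  intro fuel
  induction fuel with
  | zero => intro k hk hlt; omega
  | succ fuel ih =>
    intro k hk hlt
    rw [pvA_go]
    by_cases hkc : k = pvC N P
    · have hcon : (pvDict N P k).contains (pvSeq N P k) = true := by
        obtain ⟨m, hm, hmeq⟩ := pvC_rep N P hP
        exact (pvDict_contains N P k (pvSeq N P k)).2 ⟨m, by omega, by rw [hmeq, hkc]⟩
      rw [if_pos hcon]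
      have hJ := pvJ_spec N P hP
      have hg : (pvDict N P k).getD (pvSeq N P k) 0 = (pvJ N P : Int) := by
        rw [hkc, ← hJ.2]
        exact pvDict_getD N P _ (by omega) _ hJ.1
      rw [hg, hkc]
    · have hklt : k < pvC N P := by omega
      have hcon : (pvDict N P k).contains (pvSeq N P k) = false := by
        rw [← Bool.not_eq_true, pvDict_contains N P]
        rintro ⟨i, hi, hieq⟩
        exact pvInj N P (by omega) hklt (by omega) hieq
      rw [if_neg (by simp [hcon])]
      have h1 : (pvDict N P k).insert (pvSeq N P k) (k : Int) = pvDict N P (k + 1) := rfl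
      have h2 : PySem.Int.mod (pvSeq N P k * N) P = pvSeq N P (k + 1) := rfl
      have h3 : (k : Int) + 1 = ((k + 1 : Nat) : Int) := by push_cast; ring
      rw [h1, h2, h3]
      exact ih (k + 1) (by omega) (by omega)

lemma pvA_eq (N P : Int) (hP : P ≠ 0) :
    find_cycle_size N P = (pvC N P : Int) - (pvJ N P : Int) := by
  have h := pvA_go_spec N P hP (P.natAbs + 2) 0 (by omega)
    (by have := pvC_bound N P hP; omega)
  simpa [pvDict, pvSeq, find_cycle_size] using h

-- ===== B-side: Floyd's meeting point and the period count =====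
lemma pvMeet_exists (N P : Int) (hP : P ≠ 0) :
    ∃ m, (1 ≤ m ∧ pvSeq N P m = pvSeq N P (2 * m)) ∧ m ≤ pvC N P := by
  have hl := pvLam_pos N P hP
  have hJC : pvJ N P + pvLam N P = pvC N P := by
    have := (pvJ_spec N P hP).1; unfold pvLam; omega
  obtain ⟨a, ha1, ha2, ha3⟩ : ∃ a, 1 ≤ a ∧ pvJ N P ≤ a ∧ a ≤ pvJ N P + 1 :=
    ⟨max (pvJ N P) 1, by omega, by omega, by omega⟩
  obtain ⟨q, r, hdm, hr⟩ : ∃ q r, pvLam N P * q + r = a + pvLam N P - 1 ∧ r < pvLam N P :=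
    ⟨(a + pvLam N P - 1) / pvLam N P, (a + pvLam N P - 1) % pvLam N P,
      Nat.div_add_mod _ _, Nat.mod_lt _ hl⟩
  refine ⟨pvLam N P * q, ⟨by omega, ?_⟩, by omega⟩
  have h2 : 2 * (pvLam N P * q) = pvLam N P * q + pvLam N P * q := by ring
  rw [h2, pvPeriodMul N P hP q (pvLam N P * q) (by omega)]

lemma pvK_mem (N P : Int) (hP : P ≠ 0) :
    1 ≤ pvK N P ∧ pvSeq N P (pvK N P) = pvSeq N P (2 * pvK N P) := by
  obtain ⟨m, hm, _⟩ := pvMeet_exists N P hP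
  have hne : {k | 1 ≤ k ∧ pvSeq N P k = pvSeq N P (2 * k)}.Nonempty := ⟨m, hm⟩
  exact Nat.sInf_mem hne

lemma pvK_bound (N P : Int) (hP : P ≠ 0) : pvK N P ≤ pvC N P := by
  obtain ⟨m, hm, hle⟩ := pvMeet_exists N P hP
  exact le_trans (Nat.sInf_le hm) hle

lemma pvK_ge_J (N P : Int) (hP : P ≠ 0) : pvJ N P ≤ pvK N P := by
  by_contra h
  rw [Nat.not_le] at h
  have hl := pvLam_pos N P hP
  have hJC : pvJ N P + pvLam N P = pvC N P := by
    have := (pvJ_spec N P hP).1; unfold pvLam; omega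
  have hK := pvK_mem N P hP
  have hKC : pvK N P < pvC N P := by omega
  rcases Nat.lt_or_ge (2 * pvK N P) (pvC N P) with h2 | h2
  · exact pvInj N P hKC h2 (by omega) hK.2
  · have hred := pvReduce N P hP (2 * pvK N P) (by omega)
    have hmod : (2 * pvK N P - pvJ N P) % pvLam N P < pvLam N P := Nat.mod_lt _ hl
    have hiC : pvJ N P + (2 * pvK N P - pvJ N P) % pvLam N P < pvC N P := by omega
    have hneK : pvK N P ≠ pvJ N P + (2 * pvK N P - pvJ N P) % pvLam N P := by omega
    exact pvInj N P hKC hiC hneK (by rw [hK.2, hred])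

lemma pvB_meet_spec (N P : Int) (hP : P ≠ 0) :
    ∀ fuel k, 1 ≤ k → k ≤ pvK N P → pvK N P < k + fuel →
      pvB_meet N P fuel (pvSeq N P k) (pvSeq N P (2 * k)) = pvSeq N P (pvK N P) := by
  intro fuel
  induction fuel with
  | zero => intro k _ _ _; omega
  | succ fuel ih =>
    intro k hk1 hkK hlt
    rw [pvB_meet]
    by_cases heq : pvSeq N P k = pvSeq N P (2 * k)
    · have : pvK N P ≤ k := Nat.sInf_le ⟨hk1, heq⟩
      have hkeq : k = pvK N P := by omega
      rw [if_pos heq, hkeq]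
    · rw [if_neg heq]
      have hkK' : k < pvK N P := by
        have hne : k ≠ pvK N P := by
          intro hh
          rw [hh] at heq
          exact heq (pvK_mem N P hP).2
        omega
      have h1 : PySem.Int.mod (pvSeq N P k * N) P = pvSeq N P (k + 1) := rfl
      have h2 : PySem.Int.mod (PySem.Int.mod (pvSeq N P (2 * k) * N) P * N) P
          = pvSeq N P (2 * (k + 1)) := by
        have e : 2 * (k + 1) = 2 * k + 1 + 1 := by ring
        rw [e]
        rfl
      rw [h1, h2]
      exact ih (k + 1) (by omega) (by omega) (by omega)

lemma pvB_count_spec (N P : Int) (hP : P ≠ 0) :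
    ∀ fuel c, 1 ≤ c → c ≤ pvLam N P → pvLam N P < c + fuel →
      pvB_count N P fuel (pvSeq N P (pvK N P + c)) (pvSeq N P (pvK N P)) (c : Int)
        = (pvLam N P : Int) := by
  have hKJ := pvK_ge_J N P hP
  intro fuel
  induction fuel with
  | zero => intro c _ _ _; omega
  | succ fuel ih =>
    intro c hc1 hcl hlt
    rw [pvB_count]
    by_cases heq : pvSeq N P (pvK N P + c) = pvSeq N P (pvK N P)
    · have hceq : c = pvLam N P := by
        rcases Nat.lt_or_ge c (pvLam N P) with h | h
        · exact absurd heq (pvMinPeriod N P hP (pvK N P) c hKJ (by omega) h)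
        · omega
      rw [if_pos heq, hceq]
    · have hclt : c < pvLam N P := by
        rcases Nat.lt_or_ge c (pvLam N P) with h | h
        · exact h
        · have : c = pvLam N P := by omega
          subst this
          exact absurd (pvPeriod1 N P hP (pvK N P) hKJ) heq
      rw [if_neg heq]
      have h1 : PySem.Int.mod (pvSeq N P (pvK N P + c) * N) P = pvSeq N P (pvK N P + (c + 1)) := rfl
      have h3 : (c : Int) + 1 = ((c + 1 : Nat) : Int) := by push_cast; ring
      rw [h1, h3]
      exact ih (c + 1) (by omega) (by omega) (by omega)

lemma pvB_eq (N P : Int) (hP : P ≠ 0) :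
    find_cycle_size_alt N P = (pvLam N P : Int) := by
  have hl := pvLam_pos N P hP
  have hC := pvC_bound N P hP
  have hK := pvK_bound N P hP
  have hlamC : pvLam N P ≤ pvC N P := by unfold pvLam; omega
  have key : find_cycle_size_alt N P =
      pvB_count N P (P.natAbs + 2)
        (PySem.Int.mod (pvB_meet N P (P.natAbs + 2) (pvSeq N P 1) (pvSeq N P (2 * 1)) * N) P)
        (pvB_meet N P (P.natAbs + 2) (pvSeq N P 1) (pvSeq N P (2 * 1))) 1 := rfl
  rw [key, pvB_meet_spec N P hP (P.natAbs + 2) 1 le_rfl (pvK_mem N P hP).1 (by omega)]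
  have h3 : PySem.Int.mod (pvSeq N P (pvK N P) * N) P = pvSeq N P (pvK N P + 1) := rfl
  have h4 : (1 : Int) = ((1 : Nat) : Int) := rfl
  rw [h3, h4]
  exact pvB_count_spec N P hP (P.natAbs + 2) 1 le_rfl hl (by omega)

-- ===== VERDICT (by name: the statement is the Claim_ definition above) =====
theorem find_cycle_size_spec : Claim_equal_find_cycle_size := by
  intro N P _ hP
  unfold Spec_find_cycle_size
  rw [pvA_eq N P hP, pvB_eq N P hP]
  have := (pvJ_spec N P hP).1
  unfold pvLam
  omega
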